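-- pv_equiv track=rewrite | github.com/headhuanglan/PlayGround | MIT_intro2AlgNotes/14.py | DFS
-- ===== SOURCE A (Python) =====
-- Adj={"A":["D",],"D":["A","B","E"],"B":["C","D"],"C":["B","E","F"],"E":["D","C"],"F":["C","G"],"G":["F",]}
--
-- V=["A","B","C","D","E","F","G"]
--
-- def DFS(V):
--     parent=dict()
--     def DFS_visit(s,Adj=Adj):
--         for v in Adj[s]:
--             if v not in parent.keys():
--                 parent[v]=s
--                 DFS_visit(v,Adj)
--
--     for s in V:
--         if s not in parent.keys():
--             parent[s]=None
--             DFS_visit(s,Adj=Adj)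
--     return  parent
-- ===== SOURCE B (Python) =====
-- Adj={"A":["D",],"D":["A","B","E"],"B":["C","D"],"C":["B","E","F"],"E":["D","C"],"F":["C","G"],"G":["F",]}
--
-- def DFS(V):
--     parent = dict()
--     for s in V:
--         if s not in parent:
--             parent[s] = None
--             stack = [(s, 0)]
--             while stack:
--                 u, i = stack[-1]
--                 nbrs = Adj[u]
--                 if i == len(nbrs):
--                     stack.pop()
--                 else:
--                     stack[-1] = (u, i + 1)
--                     v = nbrs[i]
--                     if v not in parent:
--                         parent[v] = u
--                         stack.append((v, 0))
--     return parent
-- ===== Notes on version B (the rewrite author's own statement) =====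
-- stated objective: alternative
-- what changed: The nested recursive DFS_visit closure is replaced by an explicit stack of (node, next-neighbour-index) frames that simulates the recursion iteratively, preserving the exact pre-order discovery and insertion order of the parent dict.
import Mathlib
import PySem

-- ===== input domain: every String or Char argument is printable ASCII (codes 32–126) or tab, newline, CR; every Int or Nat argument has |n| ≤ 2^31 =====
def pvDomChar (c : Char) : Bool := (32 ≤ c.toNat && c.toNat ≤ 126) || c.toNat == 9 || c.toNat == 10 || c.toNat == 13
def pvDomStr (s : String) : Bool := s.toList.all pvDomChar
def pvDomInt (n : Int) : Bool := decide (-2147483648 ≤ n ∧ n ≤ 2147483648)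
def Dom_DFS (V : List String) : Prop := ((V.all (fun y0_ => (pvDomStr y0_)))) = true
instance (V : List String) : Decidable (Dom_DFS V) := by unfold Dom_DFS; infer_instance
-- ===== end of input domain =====

-- B replaces the recursive DFS_visit by an explicit stack of (node, next-neighbour-index)
-- frames simulating the recursion; same pre-order discovery, same parent dict (alternative
-- decomposition, no speed claim).

-- ===== PORT A =====

-- the module-level dict Adj
def pvAdj : PySem.Dict String (List String) :=
  PySem.Dict.ofList [("A",["D"]),("D",["A","B","E"]),("B",["C","D"]),("C",["B","E","F"]),
                     ("E",["D","C"]),("F",["C","G"]),("G",["F"])]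

-- Adj[s]; the KeyError case (s not a key) is excluded by Pre_DFS, the [] default is unreachable there
def pvAdjOf (s : String) : List String := (pvAdj.get? s).getD []

-- DFS_visit(s): the fuel argument only makes the nested recursion total; fuel 8 is never
-- exhausted since each recursive call first inserts a fresh key among the 7 vertices
mutual
def pvVisitA : Nat → String → PySem.Dict String (Option String) → PySem.Dict String (Option String)
  | 0, _, p => p
  | f+1, s, p => pvGoA f s (pvAdjOf s) p
termination_by f s p => (f, 0)

-- the 'for v in Adj[s]' loop of DFS_visit
def pvGoA : Nat → String → List String → PySem.Dict String (Option String) → PySem.Dict String (Option String)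
  | _, _, [], p => p
  | f, s, v :: vs, p =>
      if p.contains v then pvGoA f s vs p
      else pvGoA f s vs (pvVisitA f v (p.insert v (some s)))
termination_by f s vs p => (f, vs.length + 1)
end

def DFS (V : List String) : List (String × Option String) :=
  (V.foldl (fun p s => if p.contains s then p else pvVisitA 8 s (p.insert s none))
    PySem.Dict.empty).items

-- ===== PORT B =====

-- the while-stack loop of B; fuel only makes it total (64 is never exhausted: each
-- iteration either advances/pops a frame or claims one of the 7 vertices)
def pvLoopB : Nat → List (String × Nat) → PySem.Dict String (Option String) → PySem.Dict String (Option String)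
  | 0, _, p => p
  | _+1, [], p => p
  | f+1, (u, i) :: rest, p =>
      let nbrs := pvAdjOf u
      if i = nbrs.length then pvLoopB f rest p
      else
        let v := nbrs.getD i ""   -- nbrs[i]; i < nbrs.length in this branch
        if p.contains v then pvLoopB f ((u, i+1) :: rest) p
        else pvLoopB f ((v, 0) :: (u, i+1) :: rest) (p.insert v (some u))

def DFS_alt (V : List String) : List (String × Option String) :=
  (V.foldl (fun p s => if p.contains s then p else pvLoopB 64 [(s, 0)] (p.insert s none))
    PySem.Dict.empty).items

-- ===== PRECONDITION & SPEC =====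
-- Pre_ excludes exactly the inputs where the Python A raises KeyError: a start vertex that
-- is not a key of the module-level Adj (B raises there too).
def Pre_DFS (V : List String) : Prop := (V.all (fun s => pvAdj.contains s)) = true
instance (V : List String) : Decidable (Pre_DFS V) := by unfold Pre_DFS; infer_instance
def pvWitness_DFS : List String := ["A","B","C","D","E","F","G"]

def Spec_DFS (V : List String) (out : List (String × Option String)) : Prop := out = DFS_alt V
instance (V : List String) (out : List (String × Option String)) : Decidable (Spec_DFS V out) := by unfold Spec_DFS; infer_instance

-- ===== CLAIM (what is proved, stated in full; the proofs are below) =====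
def Claim_equal_DFS : Prop := ∀ (V : List String), Dom_DFS V → Pre_DFS V → Spec_DFS V (DFS V)

-- ===== LEMMAS AND PROOFS =====

def pvLetters : List String := ["A","B","C","D","E","F","G"]

-- number of vertices not yet in parent (the termination/fuel measure)
def pvMissing (p : PySem.Dict String (Option String)) : Nat :=
  pvLetters.countP (fun x => !(p.contains x))

def pvWt (fr : String × Nat) : Nat := (pvAdjOf fr.1).length + 1 - fr.2
def pvCost (st : List (String × Nat)) (p : PySem.Dict String (Option String)) : Nat :=
  (st.map pvWt).sum + 5 * pvMissing p
def pvGood (st : List (String × Nat)) : Prop := ∀ fr ∈ st, fr.2 ≤ (pvAdjOf fr.1).length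

theorem pvAdjOf_spec (u : String) :
    (∀ v ∈ pvAdjOf u, v ∈ pvLetters) ∧ (pvAdjOf u).length ≤ 3 := by
  have h : pvAdj = PySem.Dict.mk [("A",["D"]),("D",["A","B","E"]),("B",["C","D"]),("C",["B","E","F"]),
                     ("E",["D","C"]),("F",["C","G"]),("G",["F"])] := by decide
  have h0 : ∀ x, (PySem.Dict.mk ([] : List (String × List String))).get? x = none := fun _ => rfl
  unfold pvAdjOf
  rw [h]
  simp only [PySem.Dict.get?_mk_cons]
  split_ifs <;> simp_all [pvLetters, h0]

theorem pvAdj_mem {u v : String} (h : v ∈ pvAdjOf u) : v ∈ pvLetters := (pvAdjOf_spec u).1 v h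
theorem pvAdj_len (u : String) : (pvAdjOf u).length ≤ 3 := (pvAdjOf_spec u).2

theorem pvCountP_lt {α : Type} (l : List α) (q q' : α → Bool)
    (h : ∀ x ∈ l, q' x = true → q x = true) (v : α) (hv : v ∈ l)
    (hq : q v = true) (hq' : q' v = false) : l.countP q' < l.countP q := by
  induction l with
  | nil => cases hv
  | cons a l ih =>
    have hle : l.countP q' ≤ l.countP q :=
      List.countP_mono_left (fun x hx hx' => h x (List.mem_cons_of_mem a hx) hx')
    rcases List.mem_cons.mp hv with rfl | hv'
    · simp [List.countP_cons, hq, hq']; omega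
    · by_cases ha : q' a = true
      · have hqa : q a = true := h a (List.mem_cons_self) ha
        have := ih (fun x hx hx' => h x (List.mem_cons_of_mem a hx) hx') hv'
        simp [List.countP_cons, ha, hqa]; omega
      · have := ih (fun x hx hx' => h x (List.mem_cons_of_mem a hx) hx') hv'
        simp only [List.countP_cons, Bool.not_eq_true] at *
        simp [ha]
        omega

theorem pvMissing_le (p : PySem.Dict String (Option String)) : pvMissing p ≤ 7 := by
  have := List.countP_le_length (l := pvLetters) (p := fun x => !(p.contains x))
  simpa [pvLetters] using this

theorem pvMissing_insert_lt {p : PySem.Dict String (Option String)} {v : String}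
    (o : Option String) (hv : v ∈ pvLetters) (h : p.contains v = false) :
    pvMissing (p.insert v o) < pvMissing p := by
  refine pvCountP_lt _ _ _ ?_ v hv (by simp [h]) (by simp [PySem.Dict.contains_insert])
  intro x _ hx
  simp only [Bool.not_eq_true', Bool.not_eq_false] at hx ⊢
  rcases Bool.eq_false_or_eq_true (x == v) with he | he
  · simpa [PySem.Dict.contains_insert, he] using hx
  · simpa [PySem.Dict.contains_insert, he] using hx

theorem pvMono (f : Nat) :
    (∀ s p x, p.contains x = true → (pvVisitA f s p).contains x = true) ∧
    (∀ s vs p x, p.contains x = true → (pvGoA f s vs p).contains x = true) := by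
  induction f with
  | zero =>
    constructor
    · intro s p x hx; simpa [pvVisitA] using hx
    · intro s vs
      induction vs with
      | nil => intro p x hx; simpa [pvGoA] using hx
      | cons v vs ih =>
        intro p x hx
        rw [pvGoA]
        split
        · exact ih p x hx
        · exact ih _ x (by simp [pvVisitA, PySem.Dict.contains_insert, hx])
  | succ f ih =>
    have hv : ∀ s p x, p.contains x = true → (pvVisitA (f+1) s p).contains x = true := by
      intro s p x hx
      rw [pvVisitA]
      exact ih.2 s _ p x hx
    refine ⟨hv, ?_⟩
    intro s vs
    induction vs with
    | nil => intro p x hx; simpa [pvGoA] using hx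
    | cons v vs ih2 =>
      intro p x hx
      rw [pvGoA]
      split
      · exact ih2 p x hx
      · exact ih2 _ x (hv v _ x (by simp [PySem.Dict.contains_insert, hx]))

theorem pvMissing_goA_le (f : Nat) (s : String) (vs : List String)
    (p : PySem.Dict String (Option String)) : pvMissing (pvGoA f s vs p) ≤ pvMissing p := by
  apply List.countP_mono_left
  intro x _ hx
  simp only [Bool.not_eq_true', Bool.not_eq_false] at hx ⊢
  rcases Bool.eq_false_or_eq_true (p.contains x) with he | he
  · exact absurd ((pvMono f).2 s vs p x he) (by simp [hx])
  · exact he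

theorem pvLoopB_nil (f : Nat) (p : PySem.Dict String (Option String)) : pvLoopB f [] p = p := by
  cases f <;> rfl

theorem pvLoopB_fuel : ∀ c : Nat, ∀ (st : List (String × Nat)) (p : PySem.Dict String (Option String)) (f f' : Nat),
    pvGood st → pvCost st p ≤ c → pvCost st p ≤ f → pvCost st p ≤ f' →
    pvLoopB f st p = pvLoopB f' st p := by
  intro c
  induction c using Nat.strong_induction_on with
  | _ c IH =>
    intro st p f f' hg hc hf hf'
    match st with
    | [] => rw [pvLoopB_nil, pvLoopB_nil]
    | (u, i) :: rest =>
      have hi : i ≤ (pvAdjOf u).length := hg (u, i) List.mem_cons_self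
      have hcost : pvCost ((u, i) :: rest) p
          = ((pvAdjOf u).length + 1 - i) + ((rest.map pvWt).sum + 5 * pvMissing p) := by
        simp [pvCost, pvWt]; omega
      have hgr : pvGood rest := fun fr hfr => hg fr (List.mem_cons_of_mem _ hfr)
      obtain ⟨g, rfl⟩ : ∃ g, f = g + 1 := ⟨f - 1, by omega⟩
      obtain ⟨g', rfl⟩ : ∃ g', f' = g' + 1 := ⟨f' - 1, by omega⟩
      rw [pvLoopB, pvLoopB]
      by_cases hil : i = (pvAdjOf u).length
      · simp only [hil, if_true]
        exact IH ((rest.map pvWt).sum + 5 * pvMissing p) (by omega) rest p g g' hgr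
          (by simp [pvCost]) (by simp [pvCost]; omega) (by simp [pvCost]; omega)
      · simp only [hil, if_false]
        have hilt : i < (pvAdjOf u).length := by omega
        have hvmem : (pvAdjOf u).getD i "" ∈ pvAdjOf u := by
          rw [List.getD_eq_getElem _ _ hilt]; exact List.getElem_mem hilt
        have hvlet : (pvAdjOf u).getD i "" ∈ pvLetters := pvAdj_mem hvmem
        by_cases hcv : p.contains ((pvAdjOf u).getD i "") = true
        · simp only [hcv, if_true]
          have hgood : pvGood ((u, i + 1) :: rest) := by
            intro fr hfr
            rcases List.mem_cons.mp hfr with rfl | hfr'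
            · simpa using hilt
            · exact hgr fr hfr'
          have hc2 : pvCost ((u, i + 1) :: rest) p + 1 = pvCost ((u, i) :: rest) p := by
            simp [pvCost, pvWt]; omega
          exact IH (pvCost ((u, i + 1) :: rest) p) (by omega) _ p g g' hgood le_rfl (by omega) (by omega)
        · simp only [hcv, if_false]
          have hm1 : pvMissing (p.insert ((pvAdjOf u).getD i "") (some u)) < pvMissing p :=
            pvMissing_insert_lt _ hvlet (by simpa using hcv)
          have hlenv : (pvAdjOf ((pvAdjOf u).getD i "")).length ≤ 3 := pvAdj_len _
          have hgood : pvGood (((pvAdjOf u).getD i "", 0) :: (u, i + 1) :: rest) := by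
            intro fr hfr
            rcases List.mem_cons.mp hfr with rfl | hfr'
            · simp
            · rcases List.mem_cons.mp hfr' with rfl | hfr''
              · simpa using hilt
              · exact hgr fr hfr''
          have hc2 : pvCost (((pvAdjOf u).getD i "", 0) :: (u, i + 1) :: rest)
              (p.insert ((pvAdjOf u).getD i "") (some u)) + 2 ≤ pvCost ((u, i) :: rest) p := by
            have e1 : pvWt ((pvAdjOf u).getD i "", 0) = (pvAdjOf ((pvAdjOf u).getD i "")).length + 1 := by
              simp [pvWt]
            have e2 : pvWt (u, i + 1) = (pvAdjOf u).length - i := by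
              simp only [pvWt]; omega
            have e3 : pvWt (u, i) = (pvAdjOf u).length + 1 - i := rfl
            simp only [pvCost, List.map_cons, List.sum_cons, e1, e2, e3]
            omega
          exact IH (pvCost (((pvAdjOf u).getD i "", 0) :: (u, i + 1) :: rest)
              (p.insert ((pvAdjOf u).getD i "") (some u))) (by omega) _ _ g g' hgood le_rfl
            (by omega) (by omega)

theorem pvBridge : ∀ μ : Nat, ∀ (n : Nat) (p : PySem.Dict String (Option String)) (u : String) (i : Nat)
    (rest : List (String × Nat)) (f fb fb' : Nat),
    5 * n + ((pvAdjOf u).length - i) ≤ μ →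
    pvMissing p ≤ n → pvMissing p ≤ f → i ≤ (pvAdjOf u).length → pvGood rest →
    pvCost ((u, i) :: rest) p ≤ fb →
    pvCost rest (pvGoA f u ((pvAdjOf u).drop i) p) ≤ fb' →
    pvLoopB fb ((u, i) :: rest) p = pvLoopB fb' rest (pvGoA f u ((pvAdjOf u).drop i) p) := by
  intro μ
  induction μ using Nat.strong_induction_on with
  | _ μ IH =>
    intro n p u i rest f fb fb' hμ hn hf hi hgr hfb hfb'
    have e3 : pvWt (u, i) = (pvAdjOf u).length + 1 - i := rfl
    have hcost : pvCost ((u, i) :: rest) p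
        = ((pvAdjOf u).length + 1 - i) + ((rest.map pvWt).sum + 5 * pvMissing p) := by
      simp only [pvCost, List.map_cons, List.sum_cons, e3]; omega
    obtain ⟨g, rfl⟩ : ∃ g, fb = g + 1 := ⟨fb - 1, by omega⟩
    rw [pvLoopB]
    by_cases hil : i = (pvAdjOf u).length
    · subst hil
      rw [List.drop_length, pvGoA] at hfb'
      rw [if_pos rfl, List.drop_length, pvGoA]
      have hcr : pvCost rest p = (rest.map pvWt).sum + 5 * pvMissing p := rfl
      exact pvLoopB_fuel (pvCost rest p) rest p g fb' hgr le_rfl (by omega) (by omega)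
    · simp only [hil, if_false]
      have hilt : i < (pvAdjOf u).length := lt_of_le_of_ne hi hil
      have hdrop : (pvAdjOf u).drop i = (pvAdjOf u).getD i "" :: (pvAdjOf u).drop (i + 1) := by
        rw [List.getD_eq_getElem _ _ hilt]; exact (List.getElem_cons_drop hilt).symm
      have hvmem : (pvAdjOf u).getD i "" ∈ pvAdjOf u := by
        rw [List.getD_eq_getElem _ _ hilt]; exact List.getElem_mem hilt
      have hvlet : (pvAdjOf u).getD i "" ∈ pvLetters := pvAdj_mem hvmem
      rw [hdrop, pvGoA] at hfb' ⊢
      by_cases hcv : p.contains ((pvAdjOf u).getD i "") = true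
      · simp only [hcv, if_true] at hfb' ⊢
        refine IH (5 * n + ((pvAdjOf u).length - (i + 1))) (by omega) n p u (i + 1) rest f g fb'
          le_rfl hn hf (by omega) hgr ?_ hfb'
        have e2 : pvWt (u, i + 1) = (pvAdjOf u).length - i := by
          simp only [pvWt]; omega
        simp only [pvCost, List.map_cons, List.sum_cons, e2]
        omega
      · simp only [hcv, if_false] at hfb' ⊢
        have hm1 : pvMissing (p.insert ((pvAdjOf u).getD i "") (some u)) < pvMissing p :=
          pvMissing_insert_lt _ hvlet (by simpa using hcv)
        obtain ⟨e, rfl⟩ : ∃ e, f = e + 1 := ⟨f - 1, by omega⟩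
        rw [show pvVisitA (e + 1) ((pvAdjOf u).getD i "") (p.insert ((pvAdjOf u).getD i "") (some u))
            = pvGoA e ((pvAdjOf u).getD i "") (pvAdjOf ((pvAdjOf u).getD i ""))
                (p.insert ((pvAdjOf u).getD i "") (some u)) from by rw [pvVisitA]] at hfb' ⊢
        have hlenv : (pvAdjOf ((pvAdjOf u).getD i "")).length ≤ 3 := pvAdj_len _
        have hqle : pvMissing (pvGoA e ((pvAdjOf u).getD i "") (pvAdjOf ((pvAdjOf u).getD i ""))
            (p.insert ((pvAdjOf u).getD i "") (some u)))
            ≤ pvMissing (p.insert ((pvAdjOf u).getD i "") (some u)) := pvMissing_goA_le _ _ _ _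
        have hgood : pvGood ((u, i + 1) :: rest) := by
          intro fr hfr
          rcases List.mem_cons.mp hfr with rfl | hfr'
          · simpa using hilt
          · exact hgr fr hfr'
        have e1 : pvWt ((pvAdjOf u).getD i "", 0) = (pvAdjOf ((pvAdjOf u).getD i "")).length + 1 := by
          simp [pvWt]
        have e2 : pvWt (u, i + 1) = (pvAdjOf u).length - i := by
          simp only [pvWt]; omega
        have step1 := IH (5 * (n - 1) + (pvAdjOf ((pvAdjOf u).getD i "")).length) (by omega)
          (n - 1) (p.insert ((pvAdjOf u).getD i "") (some u)) ((pvAdjOf u).getD i "") 0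
          ((u, i + 1) :: rest) e g
          (pvCost ((u, i + 1) :: rest) (pvGoA e ((pvAdjOf u).getD i "")
            (pvAdjOf ((pvAdjOf u).getD i "")) (p.insert ((pvAdjOf u).getD i "") (some u))))
          (by omega) (by omega) (by omega) (by omega) hgood
          (by simp only [pvCost, List.map_cons, List.sum_cons, e1, e2]; omega)
          (by rw [List.drop_zero])
        rw [List.drop_zero] at step1
        rw [step1]
        exact IH (5 * pvMissing (pvGoA e ((pvAdjOf u).getD i "") (pvAdjOf ((pvAdjOf u).getD i ""))
            (p.insert ((pvAdjOf u).getD i "") (some u))) + ((pvAdjOf u).length - (i + 1)))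
          (by omega) _ _ u (i + 1) rest (e + 1) _ fb' le_rfl le_rfl (by omega) (by omega) hgr
          le_rfl hfb'

theorem pvStep (p : PySem.Dict String (Option String)) (s : String) :
    (if p.contains s then p else pvVisitA 8 s (p.insert s none)) =
    (if p.contains s then p else pvLoopB 64 [(s, 0)] (p.insert s none)) := by
  by_cases h : p.contains s = true
  · simp [h]
  · simp only [h, Bool.false_eq_true, if_false]
    have hlen := pvAdj_len s
    have hm := pvMissing_le (p.insert s none)
    have hmq := pvMissing_le (pvGoA 7 s ((pvAdjOf s).drop 0) (p.insert s none))
    have hb := pvBridge 38 7 (p.insert s none) s 0 [] 7 64 64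
      (by omega) hm (by omega) (Nat.zero_le _) (fun fr hfr => absurd hfr (List.not_mem_nil))
      (by simp only [pvCost, pvWt, List.map_cons, List.map_nil, List.sum_cons, List.sum_nil]; omega)
      (by simp only [pvCost, List.map_nil, List.sum_nil]; omega)
    rw [pvLoopB_nil, List.drop_zero] at hb
    rw [show pvVisitA 8 s (p.insert s none) = pvGoA 7 s (pvAdjOf s) (p.insert s none) from by rw [pvVisitA]]
    exact hb.symm

theorem pvFold (V : List String) : ∀ p,
    V.foldl (fun p s => if p.contains s then p else pvVisitA 8 s (p.insert s none)) p =
    V.foldl (fun p s => if p.contains s then p else pvLoopB 64 [(s, 0)] (p.insert s none)) p := by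
  induction V with
  | nil => intro p; rfl
  | cons s V ih => intro p; simp only [List.foldl_cons, pvStep p s]; exact ih _

-- ===== VERDICT (by name: the statement is the Claim_ definition above) =====
theorem DFS_spec : Claim_equal_DFS := by
  intro V _ _
  unfold Spec_DFS DFS DFS_alt
  rw [pvFold]
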